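-- pv_equiv track=rewrite | github.com/viniics/algorithms | lista2/questaoC.py | sla
-- ===== SOURCE A (Python) =====
-- def sla(degraus,multiplo):
--     solution = []
--     degrausQueFalta = degraus
--
--     if((degraus-degrausQueFalta)<multiplo):
--         while(degrausQueFalta-2>=multiplo):
--             degrausQueFalta-=2
--             solution.append(2)
--
--         while(degrausQueFalta!=0):
--                 degrausQueFalta-=1
--                 solution.append(1)
--
--     if len(solution)%multiplo != 0:
--          return -1
--     return len(solution)
-- ===== SOURCE B (Python) =====
-- def sla(degraus, multiplo):
--     if multiplo > 0:
--         twos = max(0, (degraus - multiplo) // 2)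
--         steps = degraus - twos
--     else:
--         steps = 0
--     return steps if steps % multiplo == 0 else -1
-- ===== Notes on version B (the rewrite author's own statement) =====
-- stated objective: faster
-- what changed: Replaced the two step-by-step while loops that build a list of 2s and 1s with closed-form arithmetic (number of 2-steps is max(0,(degraus-multiplo)//2), total steps = degraus minus that; the positive-multiplo climb guard and the mod check stay); Pre_ excludes multiplo = 0, where A raises ZeroDivisionError, and degraus < 0 with multiplo > 0, where A's second loop never terminates.
import Mathlib
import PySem

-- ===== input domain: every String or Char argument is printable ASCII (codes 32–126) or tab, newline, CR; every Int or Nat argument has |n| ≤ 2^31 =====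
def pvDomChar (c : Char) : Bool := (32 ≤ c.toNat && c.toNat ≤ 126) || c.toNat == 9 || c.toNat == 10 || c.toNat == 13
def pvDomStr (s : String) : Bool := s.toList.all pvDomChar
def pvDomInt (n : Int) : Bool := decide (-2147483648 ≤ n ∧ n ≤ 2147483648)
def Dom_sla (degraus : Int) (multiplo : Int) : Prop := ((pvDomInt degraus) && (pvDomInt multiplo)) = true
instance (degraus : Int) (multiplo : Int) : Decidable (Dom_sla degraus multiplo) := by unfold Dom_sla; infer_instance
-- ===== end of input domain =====

-- B replaces A's two counting loops by closed-form arithmetic (O(1) instead of O(degraus)).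

-- ===== PORT A =====
-- first while loop: while degrausQueFalta-2 >= multiplo: degrausQueFalta -= 2; solution.append(2)
-- (structural recursion on a fuel counter that provably never runs out; solution accumulated by
--  consing and reversed after the loops, so evaluation is linear)
def slaLoop1 (multiplo : Int) : Nat → Int → List Int → Int × List Int
  | 0, d, sol => (d, sol)
  | n + 1, d, sol =>
      if d - 2 ≥ multiplo then slaLoop1 multiplo n (d - 2) (2 :: sol) else (d, sol)

-- second while loop: while degrausQueFalta != 0: degrausQueFalta -= 1; solution.append(1)
-- (for d < 0 the Python loop diverges; that case is outside Pre_sla and the recursion is cut off there)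
def slaLoop2 : Nat → Int → List Int → List Int
  | 0, _, sol => sol
  | n + 1, d, sol =>
      if d ≠ 0 then (if 0 < d then slaLoop2 n (d - 1) (1 :: sol) else sol) else sol

def sla (degraus : Int) (multiplo : Int) : Int :=
  let degrausQueFalta := degraus
  let solution : List Int :=
    if degraus - degrausQueFalta < multiplo then
      let (d1, s1) := slaLoop1 multiplo (degrausQueFalta - multiplo).toNat degrausQueFalta []
      (slaLoop2 d1.toNat d1 s1).reverse
    else []
  if PySem.Int.mod (solution.length : Int) multiplo ≠ 0 then -1
  else (solution.length : Int)

-- ===== PORT B =====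
def sla_alt (degraus : Int) (multiplo : Int) : Int :=
  let steps :=
    if 0 < multiplo then
      degraus - max 0 (PySem.Int.floordiv (degraus - multiplo) 2)
    else 0
  if PySem.Int.mod steps multiplo = 0 then steps else -1

-- ===== PRECONDITION & SPEC =====
-- Pre_ excludes multiplo = 0 (A raises ZeroDivisionError) and degraus < 0 with multiplo > 0 (A's second loop diverges).
def Pre_sla (degraus : Int) (multiplo : Int) : Prop := multiplo ≠ 0 ∧ (0 < multiplo → 0 ≤ degraus)
instance (degraus : Int) (multiplo : Int) : Decidable (Pre_sla degraus multiplo) := by unfold Pre_sla; infer_instance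
def pvWitness_sla : Int × Int := (10, 3)

def Spec_sla (degraus : Int) (multiplo : Int) (out : Int) : Prop := out = sla_alt degraus multiplo
instance (degraus : Int) (multiplo : Int) (out : Int) : Decidable (Spec_sla degraus multiplo out) := by unfold Spec_sla; infer_instance

-- ===== CLAIM (what is proved, stated in full; the proofs are below) =====
def Claim_equal_sla : Prop := ∀ (degraus : Int) (multiplo : Int), Dom_sla degraus multiplo → Pre_sla degraus multiplo → Spec_sla degraus multiplo (sla degraus multiplo)

-- ===== LEMMAS AND PROOFS =====

-- closed form for the first loop: it performs (d - m).toNat / 2 iterations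
lemma slaLoop1_closed (m : Int) (n : Nat) (d : Int) (sol : List Int) (hn : (d - m).toNat ≤ n) :
    slaLoop1 m n d sol = (d - 2 * (((d - m).toNat / 2 : Nat) : Int), List.replicate ((d - m).toNat / 2) 2 ++ sol) := by
  induction n generalizing d sol with
  | zero =>
      have h0 : (d - m).toNat / 2 = 0 := by omega
      simp [slaLoop1, h0]
  | succ n ih =>
      by_cases h : d - 2 ≥ m
      · rw [slaLoop1, if_pos h, ih (d - 2) (2 :: sol) (by omega)]
        have hk : (d - m).toNat / 2 = (d - 2 - m).toNat / 2 + 1 := by omega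
        refine Prod.ext ?_ ?_
        · simp only [hk]; push_cast; ring
        · simp only [hk, List.replicate_add, List.replicate_one, List.append_assoc,
            List.singleton_append]
      · rw [slaLoop1, if_neg h]
        have h0 : (d - m).toNat / 2 = 0 := by omega
        simp [h0]

-- closed form for the second loop (d ≥ 0): it adds d.toNat ones
lemma slaLoop2_closed (n : Nat) (d : Int) (hd : 0 ≤ d) (hn : d.toNat ≤ n) (sol : List Int) :
    slaLoop2 n d sol = List.replicate d.toNat 1 ++ sol := by
  induction n generalizing d sol with
  | zero =>
      have h0 : d = 0 := by omega
      simp [slaLoop2, h0]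
  | succ n ih =>
      by_cases h : d = 0
      · simp [slaLoop2, h]
      · rw [slaLoop2, if_pos h, if_pos (by omega : (0:Int) < d),
          ih (d - 1) (by omega) (by omega)]
        have h3 : d.toNat = (d - 1).toNat + 1 := by omega
        rw [h3, List.replicate_add, List.replicate_one, List.append_assoc, List.singleton_append]

-- ===== VERDICT (by name: the statement is the Claim_ definition above) =====
theorem sla_spec : Claim_equal_sla := by
  intro degraus multiplo _ hpre
  obtain ⟨hm0, hdeg⟩ := hpre
  unfold Spec_sla sla sla_alt
  simp only [sub_self]
  by_cases hm : 0 < multiplo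
  · have hd : 0 ≤ degraus := hdeg hm
    rw [if_pos hm, slaLoop1_closed multiplo _ degraus [] (by omega), if_pos hm]
    set k : Nat := (degraus - multiplo).toNat / 2 with hk
    have hd2 : 0 ≤ degraus - 2 * (k : Int) := by omega
    rw [slaLoop2_closed _ _ hd2 (by omega)]
    have hlen : (((List.replicate (degraus - 2 * (k:Int)).toNat (1:Int) ++ (List.replicate k 2 ++ [])).reverse).length : Int)
        = degraus - (k : Int) := by
      simp [List.length_append]; omega
    simp only [hlen]
    have htwos : max 0 (PySem.Int.floordiv (degraus - multiplo) 2) = (k : Int) := by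
      rw [PySem.Int.floordiv_eq_ediv_of_pos (by omega)]
      omega
    rw [htwos]
    split_ifs <;> simp_all
  · have hml : ¬ (0:Int) < multiplo := hm
    rw [if_neg hml, if_neg hml]
    have h0 : PySem.Int.mod 0 multiplo = 0 := by
      simp [PySem.Int.mod]
    simp [h0]
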